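-- pv_equiv track=rewrite | github.com/DukeTresnor/python_problem_practice | number_functions.py | aliquot_sum
-- ===== SOURCE A (Python) =====
-- def aliquot_sum(number):
--     alisum = 0
--     if number <= 0:
--         raise ValueError("Classification is only possible for positive integers.")
--     if number == 1:
--         alisum = 0
--     else: #find the factors of number not counting itself
--         alisum = 1
--         for value in range(2, number-1):
--             if (number % value) == 0:
--                 # number is evenly divisible by value -- add value to the aliquot sum
--                 alisum += value
--     return alisum
-- ===== SOURCE B (Python) =====
-- def aliquot_sum(number):
--     if number <= 0:
--         raise ValueError("Classification is only possible for positive integers.")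
--     if number == 1:
--         return 0
--     total = 1
--     d = 2
--     while d * d <= number:
--         if number % d == 0:
--             q = number // d
--             total += d
--             if q != d:
--                 total += q
--         d += 1
--     return total
-- ===== Notes on version B (the rewrite author's own statement) =====
-- stated objective: faster
-- what changed: B replaces A's O(n) trial loop over all candidates 2..n-2 by divisor pairing up to sqrt(n), adding each divisor d together with its cofactor n//d.
-- outside the precondition, e.g. on aliquot_sum(0): A raises ValueError, B raises ValueError
import Mathlib
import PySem

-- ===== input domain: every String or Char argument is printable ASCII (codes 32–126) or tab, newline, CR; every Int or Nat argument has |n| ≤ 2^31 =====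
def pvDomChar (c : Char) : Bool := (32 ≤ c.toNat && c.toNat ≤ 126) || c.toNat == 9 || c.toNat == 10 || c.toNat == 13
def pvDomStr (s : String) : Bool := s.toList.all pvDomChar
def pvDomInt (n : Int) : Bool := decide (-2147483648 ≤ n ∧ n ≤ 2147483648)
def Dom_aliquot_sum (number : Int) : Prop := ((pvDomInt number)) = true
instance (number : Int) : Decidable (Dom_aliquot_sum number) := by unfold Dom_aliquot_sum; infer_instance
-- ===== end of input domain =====

-- B replaces A's trial loop over all of 2..n-2 by divisor pairing up to sqrt(n) (objective: faster).

-- ===== PORT A =====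
-- A raises ValueError for number <= 0; that branch returns 0 here and is excluded by Pre_.
def aliquot_sum (number : Int) : Int :=
  if number ≤ 0 then 0
  else if number = 1 then 0
  else
    (PySem.List.pyRange 2 (number - 1) 1).foldl
      (fun alisum value => if PySem.Int.mod number value == 0 then alisum + value else alisum) 1

-- ===== PORT B =====
-- termination helper for the while-loop below (cited in its decreasing_by)
theorem pvAliquotLoop_dec (number : Int) (d : Nat) (h : (d : Int) * d ≤ number) :
    (number + 1 - (↑(d + 1) : Int)).toNat < (number + 1 - (d : Int)).toNat := by
  have hd0 : (0:Int) ≤ (d:Int) := Int.natCast_nonneg d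
  have hdn : (d:Int) ≤ number := by
    rcases Nat.eq_zero_or_pos d with h0 | h1
    · subst h0; simpa using h
    · have h1' : (1:Int) ≤ (d:Int) := by exact_mod_cast h1
      nlinarith
  push_cast
  omega

-- the 'while d * d <= number' loop of Source B (d starts at 2 and counts up)
def aliquotLoop (number : Int) (d : Nat) (total : Int) : Int :=
  if h : (d : Int) * d ≤ number then
    let total' :=
      if PySem.Int.mod number d == 0 then
        let q := PySem.Int.floordiv number d
        if q ≠ (d : Int) then total + d + q else total + d
      else total
    aliquotLoop number (d + 1) total'
  else total
termination_by (number + 1 - d).toNat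
decreasing_by exact pvAliquotLoop_dec number d h

def aliquot_sum_alt (number : Int) : Int :=
  if number ≤ 0 then 0
  else if number = 1 then 0
  else aliquotLoop number 2 1

-- ===== PRECONDITION & SPEC =====
-- Pre_ excludes exactly number <= 0, where A raises ValueError (B raises there too).
def Pre_aliquot_sum (number : Int) : Prop := 1 ≤ number
instance (number : Int) : Decidable (Pre_aliquot_sum number) := by unfold Pre_aliquot_sum; infer_instance
def pvWitness_aliquot_sum : Int := (12)
def Spec_aliquot_sum (number : Int) (out : Int) : Prop := out = aliquot_sum_alt number
instance (number : Int) (out : Int) : Decidable (Spec_aliquot_sum number out) := by unfold Spec_aliquot_sum; infer_instance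

-- ===== CLAIM (what is proved, stated in full; the proofs are below) =====
def Claim_equal_aliquot_sum : Prop := ∀ (number : Int), Dom_aliquot_sum number → Pre_aliquot_sum number → Spec_aliquot_sum number (aliquot_sum number)

-- ===== LEMMAS AND PROOFS =====

-- sum of a filtered-and-mapped initial segment, as a Finset sum
theorem pv_range_filter_sum (P : ℕ → Bool) (f : ℕ → Int) (N : ℕ) :
    (((List.range N).filter P).map f).sum = ∑ k ∈ Finset.range N, (if P k then f k else 0) := by
  induction N with
  | zero => simp
  | succ m ih =>
      rw [List.range_succ, List.filter_append, List.map_append, List.sum_append,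
        Finset.sum_range_succ, ih]
      by_cases h : P m <;> simp [h]

-- A's loop value as a Finset sum over the interval [2, n-1)
theorem pv_A_eq (n : ℕ) (hn : 2 ≤ n) :
    aliquot_sum (n : Int) = 1 + ((∑ d ∈ (Finset.Ico 2 (n-1)).filter (· ∣ n), d : ℕ) : Int) := by
  have h0 : ¬ ((n:Int) ≤ 0) := by omega
  have h1 : ¬ ((n:Int) = 1) := by omega
  rw [aliquot_sum, if_neg h0, if_neg h1,
    PySem.List.foldl_if_eq_foldl_filter (fun value => PySem.Int.mod (n:Int) value == 0) (fun a v => a + v),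
    PySem.List.foldl_add _ (fun x => x), List.map_id_fun', PySem.List.pyRange_one, List.filter_map]
  have hmap : (List.map (fun k : ℕ => (2:Int) + ↑k)
      (List.filter ((fun value => PySem.Int.mod (n:Int) value == 0) ∘ fun k : ℕ => (2:Int) + ↑k)
        (List.range ((n:Int) - 1 - 2).toNat))).sum
      = ∑ k ∈ Finset.range ((n:Int) - 1 - 2).toNat,
          (if ((fun k : ℕ => PySem.Int.mod (n:Int) ((2:Int) + ↑k) == 0) k) then ((2:Int) + ↑k) else 0) :=
    pv_range_filter_sum _ _ _
  simp only [id]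
  rw [hmap]
  have hN : ((n:Int) - 1 - 2).toNat = n - 1 - 2 := by omega
  rw [hN]
  rw [Finset.sum_filter, Nat.cast_sum, Finset.sum_Ico_eq_sum_range]
  congr 1
  apply Finset.sum_congr rfl
  intro k _
  have hc : ((2:Int) + (k:Int)) = ((2 + k : ℕ) : Int) := by push_cast; ring
  simp only [hc, PySem.Int.mod_natCast, beq_iff_eq, Nat.cast_eq_zero]
  by_cases hd : (2 + k) ∣ n
  · simp [hd, Nat.mod_eq_zero_of_dvd hd]
  · simp only [hd, if_false]
    rw [if_neg (fun h => hd (Nat.dvd_of_mod_eq_zero h))]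
    simp

-- characterisation: 1 + (divisors of n in [2, n-1)) = sum of proper divisors
theorem pv_propA (n : ℕ) (hn : 2 ≤ n) :
    1 + ∑ d ∈ (Finset.Ico 2 (n-1)).filter (· ∣ n), d = ∑ d ∈ n.properDivisors, d := by
  have hset : n.properDivisors = insert 1 ((Finset.Ico 2 (n-1)).filter (· ∣ n)) := by
    ext m
    simp only [Nat.mem_properDivisors, Finset.mem_insert, Finset.mem_filter, Finset.mem_Ico]
    constructor
    · rintro ⟨hdvd, hlt⟩
      by_cases h1 : m = 1
      · exact Or.inl h1
      · right
        have hm1 : 1 ≤ m := Nat.pos_of_dvd_of_pos hdvd (by omega)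
        have hm2 : 2 ≤ m := by omega
        refine ⟨⟨hm2, ?_⟩, hdvd⟩
        by_contra hge
        have : m ∣ n - m := Nat.dvd_sub hdvd dvd_rfl
        have hnm : n - m = 1 := by omega
        rw [hnm] at this
        have := Nat.le_of_dvd (by omega) this
        omega
    · rintro (h1 | ⟨⟨h2, hlt⟩, hdvd⟩)
      · exact ⟨h1 ▸ one_dvd n, by omega⟩
      · exact ⟨hdvd, by omega⟩
  rw [hset, Finset.sum_insert (by simp [Finset.mem_filter])]

-- sqrt pairing: summing d and n/d over divisors d ≤ sqrt n covers every divisor once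
theorem pv_pairing (n : ℕ) (hn : 1 ≤ n) :
    ∑ d ∈ n.divisors, d
      = ∑ d ∈ n.divisors.filter (· ≤ Nat.sqrt n), (d + if n / d = d then 0 else n / d) := by
  have hn0 : n ≠ 0 := by omega
  set s := Nat.sqrt n with hs
  have hsplit := Finset.sum_filter_add_sum_filter_not n.divisors (· ≤ s) (fun d => d)
  rw [← hsplit]
  rw [Finset.sum_add_distrib]
  congr 1
  -- big divisors are the images under d ↦ n/d of the small ones with n/d ≠ d
  have himg : n.divisors.filter (fun d => ¬ d ≤ s)
      = ((n.divisors.filter (· ≤ s)).filter (fun d => ¬ n / d = d)).image (fun d => n / d) := by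
    ext m
    simp only [Finset.mem_image, Finset.mem_filter, Nat.mem_divisors]
    constructor
    · rintro ⟨⟨hdvd, _⟩, hgt⟩
      refine ⟨n / m, ⟨⟨⟨Nat.div_dvd_of_dvd hdvd, hn0⟩, ?_⟩, ?_⟩, Nat.div_div_self hdvd hn0⟩
      · -- n / m ≤ s
        by_contra hb
        have h1 : s + 1 ≤ m := by omega
        have h2 : s + 1 ≤ n / m := by omega
        have hmul : m * (n / m) = n := Nat.mul_div_cancel' hdvd
        have := Nat.lt_succ_sqrt n
        nlinarith
      · -- n / (n / m) ≠ n / m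
        rw [Nat.div_div_self hdvd hn0]
        intro h
        apply hgt
        have hmul : m * (n / m) = n := Nat.mul_div_cancel' hdvd
        exact Nat.le_sqrt.2 (by nlinarith)
    · rintro ⟨d, ⟨⟨⟨hdvd, _⟩, hle⟩, hne⟩, rfl⟩
      refine ⟨⟨Nat.div_dvd_of_dvd hdvd, hn0⟩, ?_⟩
      intro hb
      -- n/d ≤ s and d ≤ s force n/d = d, contradicting hne
      have hmul : d * (n / d) = n := Nat.mul_div_cancel' hdvd
      have hss : s * s ≤ n := Nat.sqrt_le n
      have hd1 : 1 ≤ d := Nat.pos_of_dvd_of_pos hdvd (by omega)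
      have hq1 : 1 ≤ n / d := Nat.div_pos (Nat.le_of_dvd (by omega) hdvd) (by omega)
      have h1 : d * (n / d) ≤ s * (n / d) := Nat.mul_le_mul_right _ hle
      have h2 : s * (n / d) ≤ s * s := Nat.mul_le_mul_left _ hb
      have hds : d = s := by nlinarith
      have hqs : n / d = s := by nlinarith
      exact hne (by omega)
  rw [himg, Finset.sum_image ?inj]
  case inj =>
    intro d1 hd1 d2 hd2 heq
    simp only [Finset.coe_filter, Set.mem_setOf_eq, Finset.mem_filter, Nat.mem_divisors] at hd1 hd2
    have e1 := Nat.div_div_self hd1.1.1.1 hn0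
    have e2 := Nat.div_div_self hd2.1.1.1 hn0
    simp only at heq
    rw [← e1, ← e2, heq]
  rw [Finset.sum_filter]
  apply Finset.sum_congr rfl
  intro d _
  by_cases h : n / d = d <;> simp [h]

-- B's loop computes the pairing sum from d upward
theorem pv_loop_eq (n : ℕ) (hn : 2 ≤ n) (d : ℕ) (hd : 1 ≤ d) (total : Int) :
    aliquotLoop (n : Int) d total
      = total + ∑ k ∈ (Finset.Ico d (Nat.sqrt n + 1)).filter (· ∣ n),
          ((k : Int) + if n / k = k then 0 else ((n / k : ℕ) : Int)) := by
  by_cases hle : d ≤ Nat.sqrt n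
  · have hdd : d * d ≤ n := Nat.le_sqrt.1 hle
    have hcond : ((d : Int) * d ≤ (n : Int)) := by exact_mod_cast hdd
    rw [aliquotLoop, dif_pos hcond]
    have hstep := pv_loop_eq n hn (d + 1) (by omega)
    have hico : Finset.Ico d (Nat.sqrt n + 1) = insert d (Finset.Ico (d+1) (Nat.sqrt n + 1)) :=
      (Finset.insert_Ico_add_one_left_eq_Ico (by omega)).symm
    have hnotmem : d ∉ (Finset.Ico (d+1) (Nat.sqrt n + 1)).filter (· ∣ n) := by
      simp [Finset.mem_filter]
    simp only []
    rw [hstep]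
    by_cases hdvd : d ∣ n
    · have hmod : PySem.Int.mod (n : Int) (d : Int) == 0 := by
        rw [PySem.Int.mod_natCast]
        simp [Nat.mod_eq_zero_of_dvd hdvd]
      rw [if_pos hmod, PySem.Int.floordiv_natCast]
      rw [hico, Finset.filter_insert, if_pos hdvd, Finset.sum_insert hnotmem]
      by_cases hq : n / d = d
      · have : ¬ ((↑(n / d) : Int) ≠ (d : Int)) := by simp [hq]
        rw [if_neg this, if_pos hq]
        ring
      · have : ((↑(n / d) : Int) ≠ (d : Int)) := by exact_mod_cast hq
        rw [if_pos this, if_neg hq]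
        ring
    · have hmod : ¬ (PySem.Int.mod (n : Int) (d : Int) == 0) := by
        rw [PySem.Int.mod_natCast]
        simp only [beq_iff_eq, Nat.cast_eq_zero]
        exact fun h => hdvd (Nat.dvd_of_mod_eq_zero h)
      rw [if_neg hmod]
      rw [hico, Finset.filter_insert, if_neg hdvd]
  · have hgt : Nat.sqrt n < d := by omega
    have hcond : ¬ ((d : Int) * d ≤ (n : Int)) := by
      have : n < d * d := Nat.sqrt_lt.1 hgt
      exact_mod_cast not_le.2 (by exact_mod_cast this)
    rw [aliquotLoop, dif_neg hcond]
    have : Finset.Ico d (Nat.sqrt n + 1) = ∅ := Finset.Ico_eq_empty (by omega)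
    rw [this]
    simp
termination_by Nat.sqrt n + 1 - d
decreasing_by omega

-- 1 + the pairing sum over [2, sqrt n] = sum of proper divisors
theorem pv_propB (n : ℕ) (hn : 2 ≤ n) :
    1 + ∑ k ∈ (Finset.Ico 2 (Nat.sqrt n + 1)).filter (· ∣ n), (k + if n / k = k then 0 else n / k)
      = ∑ d ∈ n.properDivisors, d := by
  have hn0 : n ≠ 0 := by omega
  have hs1 : 1 ≤ Nat.sqrt n := Nat.le_sqrt.2 (by omega)
  -- the small divisors are {1} ∪ (divisors in [2, sqrt n])
  have hsmall : n.divisors.filter (· ≤ Nat.sqrt n)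
      = insert 1 ((Finset.Ico 2 (Nat.sqrt n + 1)).filter (· ∣ n)) := by
    ext m
    simp only [Finset.mem_insert, Finset.mem_filter, Finset.mem_Ico, Nat.mem_divisors]
    constructor
    · rintro ⟨⟨hdvd, _⟩, hle⟩
      by_cases h1 : m = 1
      · exact Or.inl h1
      · have : 1 ≤ m := Nat.pos_of_dvd_of_pos hdvd (by omega)
        exact Or.inr ⟨⟨by omega, by omega⟩, hdvd⟩
    · rintro (h1 | ⟨⟨h2, hlt⟩, hdvd⟩)
      · exact ⟨⟨h1 ▸ one_dvd n, hn0⟩, by omega⟩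
      · exact ⟨⟨hdvd, hn0⟩, by omega⟩
  have h1notmem : (1:ℕ) ∉ (Finset.Ico 2 (Nat.sqrt n + 1)).filter (· ∣ n) := by
    simp [Finset.mem_filter]
  have hpair := pv_pairing n (by omega)
  have hg1 : (1:ℕ) + (if n / 1 = 1 then 0 else n / 1) = 1 + n := by
    simp [Nat.div_one]
    omega
  have := Nat.sum_divisors_eq_sum_properDivisors_add_self (n := n)
  rw [hpair, hsmall, Finset.sum_insert h1notmem, hg1] at this
  omega

-- ===== VERDICT (by name: the statement is the Claim_ definition above) =====
theorem aliquot_sum_spec : Claim_equal_aliquot_sum := by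
  intro number _ hpre
  unfold Spec_aliquot_sum
  by_cases h1 : number = 1
  · subst h1; decide
  · have hn2i : 2 ≤ number := by
      have : 1 ≤ number := hpre
      omega
    set n := number.toNat with hn
    have hnum : (n : Int) = number := Int.toNat_of_nonneg (by omega)
    have hn2 : 2 ≤ n := by omega
    have hA : aliquot_sum number = ((∑ d ∈ n.properDivisors, d : ℕ) : Int) := by
      rw [← hnum, pv_A_eq n hn2, ← pv_propA n hn2]
      push_cast
      ring
    have hB : aliquot_sum_alt number = ((∑ d ∈ n.properDivisors, d : ℕ) : Int) := by
      rw [aliquot_sum_alt, if_neg (by omega), if_neg h1, ← hnum,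
        pv_loop_eq n hn2 2 (by omega) 1, ← pv_propB n hn2]
      push_cast
      ring
    rw [hA, hB]
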